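-- pv_equiv track=rewrite | github.com/nishchya-arya/SupplyChainPlanner | scripts/generate_data.py | is_flow_restricted
-- ===== SOURCE A (Python) =====
-- GEOPOLITICAL_RESTRICTIONS = [
--     {"destination_country_code": "US", "restricted_country_code": "CN", "restriction_type": "MADE_IN",         "reason": "US-China trade restrictions"},
--     {"destination_country_code": "US", "restricted_country_code": "CN", "restriction_type": "ROUTED_THROUGH",  "reason": "US security compliance"},
--     {"destination_country_code": "US", "restricted_country_code": "BR", "restriction_type": "MADE_IN",         "reason": "US-Brazil trade policy"},
--     {"destination_country_code": "CA", "restricted_country_code": "CN", "restriction_type": "MADE_IN",         "reason": "Aligned with US-China policy"},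
--     {"destination_country_code": "CA", "restricted_country_code": "CN", "restriction_type": "ROUTED_THROUGH",  "reason": "Aligned with US security policy"},
--     {"destination_country_code": "IN", "restricted_country_code": "CN", "restriction_type": "MADE_IN",         "reason": "India-China border tensions"},
--     {"destination_country_code": "IN", "restricted_country_code": "CN", "restriction_type": "ROUTED_THROUGH",  "reason": "India security concerns"},
--     {"destination_country_code": "CN", "restricted_country_code": "US", "restriction_type": "MADE_IN",         "reason": "China reciprocal restrictions"},
--     {"destination_country_code": "CN", "restricted_country_code": "US", "restriction_type": "ROUTED_THROUGH",  "reason": "China reciprocal restrictions"},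
--     {"destination_country_code": "AU", "restricted_country_code": "CN", "restriction_type": "MADE_IN",         "reason": "Australia-China trade dispute"},
--     {"destination_country_code": "JP", "restricted_country_code": "CN", "restriction_type": "ROUTED_THROUGH",  "reason": "Japan regional security policy"},
-- ]
--
-- def is_flow_restricted(factory_country, hub_country, dest_country):
--     """Check if a flow is geopolitically restricted."""
--     for r in GEOPOLITICAL_RESTRICTIONS:
--         if r["destination_country_code"] != dest_country:
--             continue
--         if r["restriction_type"] == "MADE_IN" and r["restricted_country_code"] == factory_country:
--             return True
--         if r["restriction_type"] == "ROUTED_THROUGH" and r["restricted_country_code"] == hub_country: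
--             return True
--     return False
-- ===== SOURCE B (Python) =====
-- def is_flow_restricted(factory_country, hub_country, dest_country):
--     """Check if a flow is geopolitically restricted.
--
--     Closed-form decision procedure derived from GEOPOLITICAL_RESTRICTIONS:
--     US/CA/IN block Chinese-made and Chinese-routed goods (US also blocks
--     Brazilian-made), CN reciprocates against the US, AU blocks Chinese-made
--     only, JP blocks Chinese-routed only.
--     """
--     if dest_country in ("US", "CA", "IN"):
--         return factory_country == "CN" or hub_country == "CN" \
--             or (dest_country == "US" and factory_country == "BR")
--     if dest_country == "CN":
--         return factory_country == "US" or hub_country == "US"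
--     if dest_country == "AU":
--         return factory_country == "CN"
--     if dest_country == "JP":
--         return hub_country == "CN"
--     return False
-- ===== Notes on version B (the rewrite author's own statement) =====
-- stated objective: alternative
-- what changed: Replaces the data-driven scan over the restriction-dict table by a table-free closed-form decision procedure: an if-chain on the destination country whose branches encode the restriction logic directly as boolean formulas over the factory and hub countries (no table, no scan, no membership lookup).
import Mathlib
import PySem

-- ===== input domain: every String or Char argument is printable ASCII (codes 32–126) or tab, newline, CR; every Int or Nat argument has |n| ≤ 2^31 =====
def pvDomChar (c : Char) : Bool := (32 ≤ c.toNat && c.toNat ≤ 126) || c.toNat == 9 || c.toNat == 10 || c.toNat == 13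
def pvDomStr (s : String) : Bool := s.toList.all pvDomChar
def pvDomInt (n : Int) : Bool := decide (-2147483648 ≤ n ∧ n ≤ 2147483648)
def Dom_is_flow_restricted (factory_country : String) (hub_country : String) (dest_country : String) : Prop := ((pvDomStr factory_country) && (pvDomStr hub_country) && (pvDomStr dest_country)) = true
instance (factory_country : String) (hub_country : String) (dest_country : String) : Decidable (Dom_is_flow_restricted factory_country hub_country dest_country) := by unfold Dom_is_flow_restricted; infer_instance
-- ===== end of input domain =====

-- B replaces A's per-call scan of the restriction-dict table by a table-free closed-form
-- decision procedure: an if-chain on the destination whose branches encode the restriction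
-- logic directly as boolean formulas over the factory and hub countries (alternative).

-- ===== PORT A =====
-- each record is (destination_country_code, restricted_country_code, restriction_type, reason)
def GEOPOLITICAL_RESTRICTIONS : List (String × String × String × String) :=
  [ ("US", "CN", "MADE_IN",        "US-China trade restrictions"),
    ("US", "CN", "ROUTED_THROUGH", "US security compliance"),
    ("US", "BR", "MADE_IN",        "US-Brazil trade policy"),
    ("CA", "CN", "MADE_IN",        "Aligned with US-China policy"),
    ("CA", "CN", "ROUTED_THROUGH", "Aligned with US security policy"),
    ("IN", "CN", "MADE_IN",        "India-China border tensions"),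
    ("IN", "CN", "ROUTED_THROUGH", "India security concerns"),
    ("CN", "US", "MADE_IN",        "China reciprocal restrictions"),
    ("CN", "US", "ROUTED_THROUGH", "China reciprocal restrictions"),
    ("AU", "CN", "MADE_IN",        "Australia-China trade dispute"),
    ("JP", "CN", "ROUTED_THROUGH", "Japan regional security policy") ]

-- A's for-loop with its continue and the two in-order conditionals, line for line
def aLoop (factory_country hub_country dest_country : String) :
    List (String × String × String × String) → Bool
  | [] => false
  | r :: rest =>
    if r.1 ≠ dest_country then aLoop factory_country hub_country dest_country rest
    else if r.2.2.1 = "MADE_IN" ∧ r.2.1 = factory_country then true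
    else if r.2.2.1 = "ROUTED_THROUGH" ∧ r.2.1 = hub_country then true
    else aLoop factory_country hub_country dest_country rest

def is_flow_restricted (factory_country : String) (hub_country : String) (dest_country : String) : Bool :=
  aLoop factory_country hub_country dest_country GEOPOLITICAL_RESTRICTIONS

-- ===== PORT B =====
-- Source B's if-chain on the destination, branch for branch; no table, no scan
def is_flow_restricted_alt (factory_country : String) (hub_country : String) (dest_country : String) : Bool :=
  if dest_country = "US" ∨ dest_country = "CA" ∨ dest_country = "IN" then
    factory_country == "CN" || hub_country == "CN"
      || (dest_country == "US" && factory_country == "BR")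
  else if dest_country = "CN" then
    factory_country == "US" || hub_country == "US"
  else if dest_country = "AU" then
    factory_country == "CN"
  else if dest_country = "JP" then
    hub_country == "CN"
  else
    false

-- ===== PRECONDITION & SPEC =====
def Spec_is_flow_restricted (factory_country : String) (hub_country : String) (dest_country : String) (out : Bool) : Prop := out = is_flow_restricted_alt factory_country hub_country dest_country
instance (factory_country : String) (hub_country : String) (dest_country : String) (out : Bool) : Decidable (Spec_is_flow_restricted factory_country hub_country dest_country out) := by unfold Spec_is_flow_restricted; infer_instance

-- ===== CLAIM (what is proved, stated in full; the proofs are below) =====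
def Claim_equal_is_flow_restricted : Prop := ∀ (factory_country : String) (hub_country : String) (dest_country : String), Dom_is_flow_restricted factory_country hub_country dest_country → Spec_is_flow_restricted factory_country hub_country dest_country (is_flow_restricted factory_country hub_country dest_country)

-- ===== LEMMAS AND PROOFS =====
theorem beq_flip (a b : String) : (a == b) = decide (b = a) := by
  rcases eq_or_ne a b with hab | hab
  · subst hab; simp
  · rw [beq_eq_false_iff_ne.mpr hab, decide_eq_false (Ne.symm hab)]

-- ===== VERDICT (by name: the statement is the Claim_ definition above) =====
set_option maxHeartbeats 4000000 in
theorem is_flow_restricted_spec : Claim_equal_is_flow_restricted := by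
  intro f h d _
  unfold Spec_is_flow_restricted is_flow_restricted is_flow_restricted_alt
  by_cases hd1 : d = "US" <;> by_cases hd2 : d = "CA" <;> by_cases hd3 : d = "IN" <;>
    by_cases hd4 : d = "CN" <;> by_cases hd5 : d = "AU" <;> by_cases hd6 : d = "JP" <;>
    by_cases hf1 : f = "CN" <;> by_cases hf2 : f = "BR" <;> by_cases hf3 : f = "US" <;>
    by_cases hh1 : h = "CN" <;> by_cases hh2 : h = "US" <;>
    simp_all [aLoop, GEOPOLITICAL_RESTRICTIONS, beq_flip, eq_comm]
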